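-- pv_equiv track=rewrite | github.com/loadingsjy/algorithm | array/mostEOR.py | MostEOR
-- ===== SOURCE A (Python) =====
-- def MostEOR(arr):
--     xor = 0
--     n = len(arr)
--     dp = [0] * n
--
--     last_xor_index = dict()
--     last_xor_index[0] = (
--         -1
--     )  # key:从0位置出发某个前缀异或和, value:这个前缀异或和最晚出现的位置（index)
--
--     for i in range(n):
--         xor ^= arr[i]
--         if xor in last_xor_index:
--             pre = last_xor_index[xor]
--             if pre == -1:
--                 dp[i] = 1
--             else:
--                 dp[i] = dp[pre] + 1
--
--         if i > 0:
--             dp[i] = max(dp[i - 1], dp[i])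
--
--         last_xor_index[xor] = i
--
--     return dp[-1]
-- ===== SOURCE B (Python) =====
-- def MostEOR(arr):
--     # Greedy earliest-finish cutting: a set of prefix-xors seen since the last
--     # cut; a repeat means a zero-xor block ends here, so cut greedily.
--     xor = 0
--     cnt = 0
--     seen = {0}
--     for x in arr:
--         xor ^= x
--         if xor in seen:
--             cnt += 1
--             seen = {xor}
--         else:
--             seen.add(xor)
--     return cnt
-- ===== Notes on version B (the rewrite author's own statement) =====
-- stated objective: faster
-- what changed: Replaces A's O(n)-space dp array plus last-occurrence dict (max-carry DP) with an earliest-finish greedy: one running xor, one set of prefix xors since the last cut, and a counter that increments whenever the xor repeats.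
import Mathlib
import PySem

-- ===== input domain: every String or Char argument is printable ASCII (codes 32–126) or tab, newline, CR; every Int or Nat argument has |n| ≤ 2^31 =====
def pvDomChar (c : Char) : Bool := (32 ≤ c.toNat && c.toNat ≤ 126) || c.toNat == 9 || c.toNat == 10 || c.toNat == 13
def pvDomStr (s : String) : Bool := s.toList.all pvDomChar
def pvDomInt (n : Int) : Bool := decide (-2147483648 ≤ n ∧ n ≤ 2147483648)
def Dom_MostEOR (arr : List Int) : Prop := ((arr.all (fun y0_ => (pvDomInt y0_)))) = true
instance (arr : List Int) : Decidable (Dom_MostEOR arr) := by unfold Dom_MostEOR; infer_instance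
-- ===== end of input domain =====

-- B replaces A's dp-array + last-index dict with a greedy earliest-finish cut
-- using one set of prefix xors (objective: faster by a constant factor, as
-- measured); same return value on every non-empty list.


-- ===== PORT A =====
-- loop body of A's 'for i in range(n)'; state = (xor, dp, last_xor_index)
def MostEOR_step (arr : List Int) (st : Int × List Int × PySem.Dict Int Int) (i : Int) :
    Int × List Int × PySem.Dict Int Int :=
  let xor := PySem.Int.bxor st.1 (PySem.List.pyGetD arr i 0)  -- arr[i]; i is in range
  let dp := st.2.1
  let d := st.2.2
  -- if xor in last_xor_index: pre = last_xor_index[xor]; dp[i] = 1 / dp[pre] + 1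
  let dp :=
    match d.get? xor with
    | some pre =>
        if pre = -1 then PySem.List.pySetD dp i 1
        else PySem.List.pySetD dp i (PySem.List.pyGetD dp pre 0 + 1)  -- pre is in range
    | none => dp
  -- if i > 0: dp[i] = max(dp[i-1], dp[i])
  let dp :=
    if 0 < i then
      PySem.List.pySetD dp i (max (PySem.List.pyGetD dp (i - 1) 0) (PySem.List.pyGetD dp i 0))
    else dp
  (xor, dp, d.insert xor i)

def MostEOR (arr : List Int) : Int :=
  let r :=
    (PySem.List.pyRange 0 (arr.length : Int)).foldl (MostEOR_step arr)
      (0, List.replicate arr.length 0, (PySem.Dict.empty).insert 0 (-1))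
  -- final dp entry via negative indexing; none = IndexError, only on the empty
  -- list, excluded by Pre_MostEOR
  (PySem.List.pyGet? r.2.1 (-1)).getD 0

-- ===== PORT B =====
-- loop body of B's 'for x in arr'; state = (xor, cnt, seen)
def MostEORalt_step (st : Int × Int × PySem.Set Int) (x : Int) : Int × Int × PySem.Set Int :=
  let xor := PySem.Int.bxor st.1 x
  if PySem.Set.contains st.2.2 xor then (xor, st.2.1 + 1, PySem.Set.ofList [xor])
  else (xor, st.2.1, PySem.Set.add st.2.2 xor)

def MostEOR_alt (arr : List Int) : Int :=
  (arr.foldl MostEORalt_step (0, 0, PySem.Set.ofList [0])).2.1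

-- ===== PRECONDITION & SPEC =====
-- A reads the last dp entry of an empty dp list and raises IndexError there;
-- Pre_ excludes only the empty list (B returns 0 there).
def Pre_MostEOR (arr : List Int) : Prop := arr ≠ []
instance (arr : List Int) : Decidable (Pre_MostEOR arr) := by unfold Pre_MostEOR; infer_instance

def pvWitness_MostEOR : List Int := [1, 2, 3, 0]

def Spec_MostEOR (arr : List Int) (out : Int) : Prop := out = MostEOR_alt arr
instance (arr : List Int) (out : Int) : Decidable (Spec_MostEOR arr out) := by unfold Spec_MostEOR; infer_instance

-- ===== CLAIM (what is proved, stated in full; the proofs are below) =====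
def Claim_equal_MostEOR : Prop := ∀ (arr : List Int), Dom_MostEOR arr → Pre_MostEOR arr → Spec_MostEOR arr (MostEOR arr)

-- ===== LEMMAS AND PROOFS =====

-- xor of the first k elements of l (A's and B's running xor after k steps)
def pfx (l : List Int) (k : Nat) : Int := (l.take k).foldl PySem.Int.bxor 0

-- The loop invariant tying A's state (xor, dp, last_xor_index) after processing
-- `done` to B's state (xor, cnt, seen); b = number of elements consumed at B's
-- last cut (0 if none yet).
def MEInv (n : Nat) (done : List Int)
    (stA : Int × List Int × PySem.Dict Int Int) (stB : Int × Int × PySem.Set Int) : Prop :=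
  ∃ b : Nat,
    b ≤ done.length ∧
    stA.1 = pfx done done.length ∧
    stB.1 = stA.1 ∧
    stA.2.1.length = n ∧ done.length ≤ n ∧
    (∀ v, v ∈ stB.2.2 ↔ ∃ k : Nat, b ≤ k ∧ k ≤ done.length ∧ pfx done k = v) ∧
    (∀ v p, stA.2.2.get? v = some p ↔
      ∃ k : Nat, p = (k : Int) - 1 ∧ k ≤ done.length ∧ pfx done k = v ∧
        ∀ k', k < k' → k' ≤ done.length → pfx done k' ≠ v) ∧
    (∀ j : Nat, j < done.length → (stA.2.1.getD j 0 = stB.2.1 ↔ b ≤ j + 1)) ∧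
    (∀ j j' : Nat, j ≤ j' → j' < done.length → stA.2.1.getD j 0 ≤ stA.2.1.getD j' 0) ∧
    (∀ j : Nat, done.length ≤ j → stA.2.1.getD j 0 = 0) ∧
    (b = 0 ↔ stB.2.1 = 0) ∧ 0 ≤ stB.2.1

lemma pfx_append_le (l : List Int) (x : Int) (k : Nat) (h : k ≤ l.length) :
    pfx (l ++ [x]) k = pfx l k := by
  unfold pfx
  rw [List.take_append_of_le_length h]

lemma pfx_append_full (l : List Int) (x : Int) :
    pfx (l ++ [x]) (l.length + 1) = PySem.Int.bxor (pfx l l.length) x := by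
  unfold pfx
  rw [List.take_of_length_le (by simp), List.foldl_append, List.take_length]
  rfl

lemma getD_set (l : List Int) (i j : Nat) (v : Int) (hi : i < l.length) :
    (l.set i v).getD j 0 = if j = i then v else l.getD j 0 := by
  rcases eq_or_ne j i with rfl | h
  · simp [List.getD, hi]
  · simp [List.getD, List.getElem?_set_ne (Ne.symm h), h]

lemma getD_append_len (done : List Int) (x : Int) (rest : List Int) :
    (done ++ x :: rest).getD done.length 0 = x := by
  simp [List.getD]

-- updating the last-occurrence dict: insert of the new prefix xor keeps the
-- "greatest occurrence" characterization.
lemma dict_step (done : List Int) (x : Int) (d : PySem.Dict Int Int) (xor' : Int)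
    (hD : ∀ v p, d.get? v = some p ↔
      ∃ k : Nat, p = (k : Int) - 1 ∧ k ≤ done.length ∧ pfx done k = v ∧
        ∀ k', k < k' → k' ≤ done.length → pfx done k' ≠ v)
    (hxor' : pfx (done ++ [x]) (done.length + 1) = xor') :
    ∀ v p, (d.insert xor' (done.length : Int)).get? v = some p ↔
      ∃ k : Nat, p = (k : Int) - 1 ∧ k ≤ (done ++ [x]).length ∧ pfx (done ++ [x]) k = v ∧
        ∀ k', k < k' → k' ≤ (done ++ [x]).length → pfx (done ++ [x]) k' ≠ v := by
  intro v p
  have hlen : (done ++ [x]).length = done.length + 1 := by simp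
  rw [PySem.Dict.get?_insert, hlen]
  rcases eq_or_ne v xor' with rfl | hne
  · rw [if_pos rfl]
    constructor
    · rintro h
      injection h with h
      exact ⟨done.length + 1, by omega, le_refl _, hxor', fun k' h1 h2 _ => by omega⟩
    · rintro ⟨k, hp, hk, hP, hmax⟩
      have hk' : k = done.length + 1 := by
        by_contra hne
        exact hmax (done.length + 1) (by omega) (le_refl _) hxor'
      subst hk'
      rw [hp]
      simp only [Option.some.injEq]
      push_cast
      ring
  · simp only [if_neg hne, hD]
    constructor
    · rintro ⟨k, hp, hk, hP, hmax⟩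
      refine ⟨k, hp, by omega, by rw [pfx_append_le _ _ _ hk]; exact hP, ?_⟩
      intro k' h1 h2
      rcases Nat.lt_or_ge k' (done.length + 1) with h3 | h3
      · rw [pfx_append_le _ _ _ (by omega)]; exact hmax k' h1 (by omega)
      · have : k' = done.length + 1 := by omega
        subst this
        rw [hxor']; exact fun e => hne e.symm
    · rintro ⟨k, hp, hk, hP, hmax⟩
      have hk2 : k ≤ done.length := by
        by_contra h4
        have : k = done.length + 1 := by omega
        subst this
        rw [hxor'] at hP; exact hne hP.symm
      refine ⟨k, hp, hk2, by rw [pfx_append_le _ _ _ hk2] at hP; exact hP, ?_⟩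
      intro k' h1 h2 hP'
      exact hmax k' h1 (by omega) (by rw [pfx_append_le _ _ _ h2]; exact hP')

-- assembling the invariant for the new state after one step (b' = b for a plain
-- step, b' = done.length + 1 and c' = c + 1 after a greedy cut).
lemma mk_inv (n : Nat) (done : List Int) (x : Int) (dp : List Int) (d : PySem.Dict Int Int)
    (s' : PySem.Set Int) (b b' : Nat) (c c' xor' : Int) (dp' : List Int)
    (hn : done.length < n) (hb : b ≤ done.length)
    (hxor' : pfx (done ++ [x]) (done.length + 1) = xor')
    (hD : ∀ v p, d.get? v = some p ↔
      ∃ k : Nat, p = (k : Int) - 1 ∧ k ≤ done.length ∧ pfx done k = v ∧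
        ∀ k', k < k' → k' ≤ done.length → pfx done k' ≠ v)
    (hdp : ∀ j : Nat, j < done.length → (dp.getD j 0 = c ↔ b ≤ j + 1))
    (hmono : ∀ j j' : Nat, j ≤ j' → j' < done.length → dp.getD j 0 ≤ dp.getD j' 0)
    (hzero : ∀ j : Nat, done.length ≤ j → dp.getD j 0 = 0)
    (hb0 : b = 0 ↔ c = 0) (hc0 : 0 ≤ c)
    (hlen' : dp'.length = n)
    (hdp' : ∀ j : Nat, dp'.getD j 0 = if j = done.length then c' else dp.getD j 0)
    (hS' : ∀ v, v ∈ s' ↔ ∃ k : Nat, b' ≤ k ∧ k ≤ done.length + 1 ∧ pfx (done ++ [x]) k = v)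
    (hbc' : (b' = b ∧ c' = c) ∨ (b' = done.length + 1 ∧ c' = c + 1)) :
    MEInv n (done ++ [x]) (xor', dp', d.insert xor' (done.length : Int)) (xor', c', s') := by
  have hlen : (done ++ [x]).length = done.length + 1 := by simp
  have hdple : ∀ j : Nat, j < done.length → dp.getD j 0 ≤ c := by
    intro j hj
    calc dp.getD j 0 ≤ dp.getD (done.length - 1) 0 := hmono _ _ (by omega) (by omega)
    _ = c := (hdp _ (by omega)).mpr (by omega)
  have hcc' : c ≤ c' := by rcases hbc' with ⟨_, rfl⟩ | ⟨_, rfl⟩ <;> omega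
  refine ⟨b', ?_, ?_, rfl, hlen', ?_, ?_, dict_step done x d xor' hD hxor', ?_, ?_, ?_, ?_, ?_⟩
  · rw [hlen]; rcases hbc' with ⟨rfl, _⟩ | ⟨rfl, _⟩ <;> omega
  · rw [hlen, hxor']
  · rw [hlen]; omega
  · intro v; rw [hS' v, hlen]
  · -- dp' values vs the (possibly new) count
    intro j hj
    rw [hlen] at hj
    rw [hdp' j]
    rcases eq_or_ne j done.length with rfl | hne
    · rw [if_pos rfl]
      constructor
      · intro _; rcases hbc' with ⟨rfl, _⟩ | ⟨rfl, _⟩ <;> omega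
      · intro _; rfl
    · simp only [if_neg hne]
      have hj' : j < done.length := by omega
      rcases hbc' with ⟨rfl, rfl⟩ | ⟨rfl, rfl⟩
      · exact hdp j hj'
      · constructor
        · intro he
          exfalso
          have := hdple j hj'
          omega
        · intro hge; omega
  · -- monotone
    intro j j' hjj hj'
    rw [hlen] at hj'
    rw [hdp' j, hdp' j']
    rcases eq_or_ne j' done.length with rfl | hne'
    · rw [if_pos rfl]
      rcases eq_or_ne j done.length with rfl | hne
      · simp
      · simp only [if_neg hne]
        exact le_trans (hdple j (by omega)) hcc'
    · have hj2 : j' < done.length := by omega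
      rw [if_neg hne', if_neg (by omega : j ≠ done.length)]
      exact hmono j j' hjj hj2
  · intro j hj
    rw [hlen] at hj
    rw [hdp' j, if_neg (by omega : j ≠ done.length)]
    exact hzero j (by omega)
  · dsimp only
    rcases hbc' with ⟨rfl, rfl⟩ | ⟨rfl, rfl⟩
    · exact hb0
    · constructor <;> intro h <;> omega
  · dsimp only
    rcases hbc' with ⟨_, rfl⟩ | ⟨_, rfl⟩ <;> omega

-- the one step: A's body at index done.length and B's body on the new element
-- preserve the invariant.
lemma step_inv (n : Nat) (done : List Int) (x : Int) (rest : List Int)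
    (stA : Int × List Int × PySem.Dict Int Int) (stB : Int × Int × PySem.Set Int)
    (h : MEInv n done stA stB) (hn : done.length < n) :
    MEInv n (done ++ [x]) (MostEOR_step (done ++ x :: rest) stA (done.length : Int))
      (MostEORalt_step stB x) := by
  obtain ⟨xa, dp, d⟩ := stA
  obtain ⟨xb, c, s⟩ := stB
  obtain ⟨b, hb, hxa, hxbeq, hlen, hle, hS, hD, hdp, hmono, hzero, hb0, hc0⟩ := h
  simp only at hxa hxbeq hlen hle hS hD hdp hmono hzero hb0 hc0 hb
  subst hxbeq
  have hx : PySem.List.pyGetD (done ++ x :: rest) (done.length : Int) 0 = x := by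
    rw [PySem.List.pyGetD_natCast]; exact getD_append_len done x rest
  set xor' := PySem.Int.bxor xb x with hxdef
  have hxor' : pfx (done ++ [x]) (done.length + 1) = xor' := by
    rw [pfx_append_full, ← hxa, hxdef]
  have hdple : ∀ j : Nat, j < done.length → dp.getD j 0 ≤ c := by
    intro j hj
    calc dp.getD j 0 ≤ dp.getD (done.length - 1) 0 := hmono _ _ (by omega) (by omega)
    _ = c := (hdp _ (by omega)).mpr (by omega)
  by_cases hocc : ∃ k : Nat, k ≤ done.length ∧ pfx done k = xor'
  · -- xor' occurred among the prefix xors: A's dict lookup hits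
    obtain ⟨km, hkmdef⟩ : ∃ km, km = Nat.findGreatest (fun k => pfx done k = xor') done.length :=
      ⟨_, rfl⟩
    obtain ⟨k0, hk0, hPk0⟩ := hocc
    have hkm_le : km ≤ done.length := by
      rw [hkmdef]; exact Nat.findGreatest_le _
    have hPkm : pfx done km = xor' := by
      rw [hkmdef]
      exact Nat.findGreatest_spec (P := fun k => pfx done k = xor') hk0 hPk0
    have hmax : ∀ k', km < k' → k' ≤ done.length → pfx done k' ≠ xor' := by
      rw [hkmdef]
      exact fun k' h1 h2 =>
        Nat.findGreatest_is_greatest (P := fun k => pfx done k = xor') h1 h2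
    have hsome : d.get? xor' = some ((km : Int) - 1) :=
      (hD xor' _).mpr ⟨km, rfl, hkm_le, hPkm, hmax⟩
    -- value A adds one to: 0 for pre = -1, dp[pre] otherwise
    have hdval : ∀ hkm1 : 1 ≤ km, PySem.List.pyGetD dp ((km : Int) - 1) 0 = dp.getD (km - 1) 0 := by
      intro hkm1
      rw [(by omega : (km : Int) - 1 = ((km - 1 : Nat) : Int)), PySem.List.pyGetD_natCast]
    by_cases hcut : b ≤ km
    · -- greedy cut: B's membership test succeeds, A's dp[i] becomes c + 1
      have hmem : xor' ∈ s := (hS xor').mpr ⟨km, hcut, hkm_le, hPkm⟩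
      have hcont : PySem.Set.contains s xor' = true := (PySem.Set.contains_iff s xor').mpr hmem
      have hgoalB : MostEORalt_step (xb, c, s) x = (xor', c + 1, PySem.Set.ofList [xor']) := by
        simp only [MostEORalt_step, ← hxdef, hcont, if_true]
      rw [hgoalB]
      have hgoalA : MostEOR_step (done ++ x :: rest) (xb, dp, d) (done.length : Int)
          = (xor', dp.set done.length (c + 1), d.insert xor' (done.length : Int)) := by
        simp only [MostEOR_step, hx, ← hxdef, hsome]
        rcases Nat.eq_zero_or_pos km with h0 | hpos
        · subst h0
          have hcz : c = 0 := hb0.mp (by omega)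
          have e1 : ((0 : Nat) : Int) - 1 = -1 := by norm_num
          rw [e1, if_pos rfl, PySem.List.pySetD_natCast]
          rcases Nat.eq_zero_or_pos done.length with hi0 | hi0
          · rw [hi0]
            norm_num [hcz]
            rw [show (0 : Int) = ((0 : Nat) : Int) by norm_num, PySem.List.pySetD_natCast]
          · rw [if_pos (by omega : (0 : Int) < (done.length : Int))]
            simp only [PySem.List.pySetD_natCast]
            simp only [(by omega : ((done.length : Int) - 1) = ((done.length - 1 : Nat) : Int)),
              PySem.List.pyGetD_natCast]
            rw [getD_set dp done.length (done.length - 1) 1 (by omega),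
              if_neg (by omega : done.length - 1 ≠ done.length),
              getD_set dp done.length done.length 1 (by omega), if_pos rfl, List.set_set]
            have h3 : dp.getD (done.length - 1) 0 = c := (hdp _ (by omega)).mpr (by omega)
            rw [h3, hcz]
            norm_num
        · have hpre : (km : Int) - 1 ≠ -1 := by omega
          simp only [if_neg hpre, hdval hpos, PySem.List.pySetD_natCast]
          have hcval : dp.getD (km - 1) 0 = c := (hdp (km - 1) (by omega)).mpr (by omega)
          rw [hcval]
          rw [if_pos (by omega : (0 : Int) < (done.length : Int))]
          simp only [(by omega : ((done.length : Int) - 1) = ((done.length - 1 : Nat) : Int)),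
            PySem.List.pyGetD_natCast]
          have h1 : (dp.set done.length (c + 1)).getD (done.length - 1) 0 = dp.getD (done.length - 1) 0 := by
            rw [getD_set dp done.length (done.length - 1) (c + 1) (by omega),
              if_neg (by omega : done.length - 1 ≠ done.length)]
          have h2 : (dp.set done.length (c + 1)).getD done.length 0 = c + 1 := by
            rw [getD_set dp done.length done.length (c + 1) (by omega), if_pos rfl]
          rw [h1, h2, List.set_set]
          have h3 : dp.getD (done.length - 1) 0 = c := (hdp _ (by omega)).mpr (by omega)
          rw [h3, max_eq_right (by omega)]
      rw [hgoalA]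
      refine mk_inv n done x dp d _ b (done.length + 1) c (c + 1) xor' _ hn hb hxor' hD hdp
        hmono hzero hb0 hc0 (by simp [hlen]) ?_ ?_ (Or.inr ⟨rfl, rfl⟩)
      · intro j; exact getD_set dp done.length j (c + 1) (by omega)
      · intro v
        constructor
        · intro hv
          have : v = xor' := by simpa [PySem.Set.ofList] using hv
          exact ⟨done.length + 1, le_refl _, le_refl _, by rw [hxor', this]⟩
        · rintro ⟨k, h1, h2, h3⟩
          have : k = done.length + 1 := by omega
          subst this
          rw [hxor'] at h3
          simp [PySem.Set.ofList, h3]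
    · -- occurrence is before the last cut: neither program counts
      rw [Nat.not_le] at hcut
      have hb1 : 1 ≤ b := by omega
      have hi0 : 1 ≤ done.length := by omega
      have hnmem : xor' ∉ s := by
        intro hm
        obtain ⟨k, h1, h2, h3⟩ := (hS xor').mp hm
        exact hmax k (by omega) h2 h3
      have hcont : PySem.Set.contains s xor' = false := by
        rw [← Bool.not_eq_true, PySem.Set.contains_iff]; exact hnmem
      have hgoalB : MostEORalt_step (xb, c, s) x = (xor', c, PySem.Set.add s xor') := by
        simp only [MostEORalt_step, ← hxdef, hcont, Bool.false_eq_true, if_false]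
      rw [hgoalB]
      -- the candidate value dp[pre] + 1 cannot beat dp[i-1] = c
      have hdval_lt : (if km = 0 then (0 : Int) else dp.getD (km - 1) 0) < c := by
        split_ifs with h0
        · have hcne : c ≠ 0 := fun hc => absurd (hb0.mpr hc) (by omega)
          omega
        · have hne : dp.getD (km - 1) 0 ≠ c := fun he => by
            have := (hdp (km - 1) (by omega)).mp he
            omega
          have hle' : dp.getD (km - 1) 0 ≤ c := hdple _ (by omega)
          omega
      have hgoalA : MostEOR_step (done ++ x :: rest) (xb, dp, d) (done.length : Int)
          = (xor', dp.set done.length c, d.insert xor' (done.length : Int)) := by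
        simp only [MostEOR_step, hx, ← hxdef, hsome]
        have hcase : (if (km : Int) - 1 = -1 then PySem.List.pySetD dp (done.length : Int) 1
            else PySem.List.pySetD dp (done.length : Int) (PySem.List.pyGetD dp ((km : Int) - 1) 0 + 1))
            = dp.set done.length ((if km = 0 then (0 : Int) else dp.getD (km - 1) 0) + 1) := by
          rcases Nat.eq_zero_or_pos km with h0 | hpos
          · subst h0
            simp [PySem.List.pySetD_natCast]
          · rw [if_neg (by omega : (km : Int) - 1 ≠ -1), hdval hpos,
              PySem.List.pySetD_natCast, if_neg (by omega : km ≠ 0)]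
        rw [hcase]
        set dval := (if km = 0 then (0 : Int) else dp.getD (km - 1) 0) with hdvdef
        rw [if_pos (by omega : (0 : Int) < (done.length : Int))]
        simp only [(by omega : ((done.length : Int) - 1) = ((done.length - 1 : Nat) : Int)),
          PySem.List.pyGetD_natCast, PySem.List.pyGetD_natCast, PySem.List.pySetD_natCast]
        rw [getD_set dp done.length (done.length - 1) (dval + 1) (by omega),
          if_neg (by omega : done.length - 1 ≠ done.length),
          getD_set dp done.length done.length (dval + 1) (by omega), if_pos rfl, List.set_set]
        have h3 : dp.getD (done.length - 1) 0 = c := (hdp _ (by omega)).mpr (by omega)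
        rw [h3, max_eq_left (by omega)]
      rw [hgoalA]
      refine mk_inv n done x dp d _ b b c c xor' _ hn hb hxor' hD hdp
        hmono hzero hb0 hc0 (by simp [hlen]) ?_ ?_ (Or.inl ⟨rfl, rfl⟩)
      · intro j; exact getD_set dp done.length j c (by omega)
      · intro v
        rw [PySem.Set.mem_add]
        constructor
        · rintro (hv | rfl)
          · obtain ⟨k, h1, h2, h3⟩ := (hS v).mp hv
            exact ⟨k, h1, by omega, by rw [pfx_append_le _ _ _ h2]; exact h3⟩
          · exact ⟨done.length + 1, by omega, le_refl _, hxor'⟩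
        · rintro ⟨k, h1, h2, h3⟩
          rcases Nat.lt_or_ge k (done.length + 1) with h4 | h4
          · left
            rw [pfx_append_le _ _ _ (by omega)] at h3
            exact (hS v).mpr ⟨k, h1, by omega, h3⟩
          · right
            have : k = done.length + 1 := by omega
            subst this
            rw [hxor'] at h3; exact h3.symm
  · -- xor' never occurred: A's lookup misses, B's membership test fails
    have hnone : d.get? xor' = none := by
      rcases hd : d.get? xor' with _ | p
      · rfl
      · obtain ⟨k, _, h2, h3, _⟩ := (hD xor' p).mp hd
        exact absurd ⟨k, h2, h3⟩ hocc
    have hnmem : xor' ∉ s := by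
      intro hm
      obtain ⟨k, _, h2, h3⟩ := (hS xor').mp hm
      exact hocc ⟨k, h2, h3⟩
    have hcont : PySem.Set.contains s xor' = false := by
      rw [← Bool.not_eq_true, PySem.Set.contains_iff]; exact hnmem
    have hgoalB : MostEORalt_step (xb, c, s) x = (xor', c, PySem.Set.add s xor') := by
      simp only [MostEORalt_step, ← hxdef, hcont, Bool.false_eq_true, if_false]
    rw [hgoalB]
    have hc_eq : done.length = 0 → c = 0 := fun h0 => hb0.mp (by omega)
    have hgoalA : MostEOR_step (done ++ x :: rest) (xb, dp, d) (done.length : Int)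
        = (xor', dp.set done.length c, d.insert xor' (done.length : Int)) := by
      simp only [MostEOR_step, hx, ← hxdef, hnone]
      rcases Nat.eq_zero_or_pos done.length with h0 | hpos
      · rw [h0]
        simp only [Nat.cast_zero, lt_irrefl, if_false]
        have : dp.set 0 c = dp := by
          have hcz : c = 0 := hc_eq h0
          have : dp.getD 0 0 = 0 := hzero 0 (by omega)
          apply List.ext_getElem (by simp)
          intro i h1 h2
          rcases Nat.eq_zero_or_pos i with rfl | hip
          · rw [List.getElem_set_self]
            · simp only [List.getD] at this
              rw [List.getElem?_eq_getElem h2] at this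
              simpa [hcz] using this.symm
          · rw [List.getElem_set_ne (by omega)]
        rw [this]
      · rw [if_pos (by omega : (0 : Int) < (done.length : Int))]
        simp only [(by omega : ((done.length : Int) - 1) = ((done.length - 1 : Nat) : Int)),
          PySem.List.pyGetD_natCast, PySem.List.pyGetD_natCast, PySem.List.pySetD_natCast]
        have h1 : dp.getD (done.length - 1) 0 = c := (hdp _ (by omega)).mpr (by omega)
        have h2 : dp.getD done.length 0 = 0 := hzero _ (le_refl _)
        rw [h1, h2, max_eq_left (by omega)]
    rw [hgoalA]
    refine mk_inv n done x dp d _ b b c c xor' _ hn hb hxor' hD hdp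
      hmono hzero hb0 hc0 (by simp [hlen]) ?_ ?_ (Or.inl ⟨rfl, rfl⟩)
    · intro j; exact getD_set dp done.length j c (by omega)
    · intro v
      rw [PySem.Set.mem_add]
      constructor
      · rintro (hv | rfl)
        · obtain ⟨k, h1, h2, h3⟩ := (hS v).mp hv
          exact ⟨k, h1, by omega, by rw [pfx_append_le _ _ _ h2]; exact h3⟩
        · exact ⟨done.length + 1, by omega, le_refl _, hxor'⟩
      · rintro ⟨k, h1, h2, h3⟩
        rcases Nat.lt_or_ge k (done.length + 1) with h4 | h4
        · left
          rw [pfx_append_le _ _ _ (by omega)] at h3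
          exact (hS v).mpr ⟨k, h1, by omega, h3⟩
        · right
          have : k = done.length + 1 := by omega
          subst this
          rw [hxor'] at h3; exact h3.symm

lemma loop_inv (n : Nat) : ∀ (rest done : List Int)
    (stA : Int × List Int × PySem.Dict Int Int) (stB : Int × Int × PySem.Set Int),
    n = done.length + rest.length → MEInv n done stA stB →
    MEInv n (done ++ rest)
      ((PySem.List.pyRange (done.length : Int) (n : Int)).foldl (MostEOR_step (done ++ rest)) stA)
      (rest.foldl MostEORalt_step stB) := by
  intro rest
  induction rest with
  | nil =>
      intro done stA stB hlen h
      have he : (done.length : Int) = (n : Int) := by simp at hlen; omega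
      rw [he, PySem.List.pyRange_one_eq_nil (le_refl _)]
      simpa using h
  | cons x rest ih =>
      intro done stA stB hlen h
      have hlt : done.length < n := by simp at hlen; omega
      rw [PySem.List.pyRange_one_cons (by exact_mod_cast hlt), List.foldl_cons, List.foldl_cons]
      have hstep := step_inv n done x rest stA stB h hlt
      have happ : done ++ x :: rest = (done ++ [x]) ++ rest := by simp
      have hlen2 : ((done ++ [x]).length : Int) = (done.length : Int) + 1 := by
        simp
      have := ih (done ++ [x]) (MostEOR_step (done ++ x :: rest) stA (done.length : Int))
        (MostEORalt_step stB x) (by simp at hlen ⊢; omega) hstep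
      rw [happ]
      rw [happ] at this
      rw [← hlen2]
      exact this

lemma pyGet_neg_one (l : List Int) (k : Nat) (hl : l.length = k + 1) :
    PySem.List.pyGet? l (-1) = some (l.getD k 0) := by
  simp [PySem.List.pyGet?, PySem.List.pyIdx?, hl]

lemma init_inv (arr : List Int) :
    MEInv arr.length []
      (0, List.replicate arr.length 0, (PySem.Dict.empty).insert 0 (-1))
      (0, 0, PySem.Set.ofList [0]) := by
  refine ⟨0, le_refl _, by simp [pfx], rfl, by simp, by simp, ?_, ?_, by simp, by simp, ?_, by simp, le_refl _⟩
  · intro v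
    rw [PySem.Set.mem_ofList]
    simp only [List.mem_singleton, List.length_nil]
    constructor
    · rintro rfl
      exact ⟨0, le_refl _, le_refl _, by simp [pfx]⟩
    · rintro ⟨k, _, hk, hP⟩
      rw [Nat.le_zero] at hk
      subst hk
      simp only [pfx, List.take_nil, List.foldl_nil] at hP
      exact hP.symm
  · intro v p
    rw [PySem.Dict.get?_insert, PySem.Dict.get?_empty]
    constructor
    · intro hvp
      split_ifs at hvp with hv
      · injection hvp with hvp
        refine ⟨0, by omega, le_refl _, by simp [pfx, hv], ?_⟩
        intro k' h1 h2
        rw [List.length_nil, Nat.le_zero] at h2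
        omega
    · rintro ⟨k, hp, hk, hP, _⟩
      simp only [List.length_nil, Nat.le_zero] at hk
      subst hk
      simp only [pfx, List.take_nil, List.foldl_nil] at hP
      rw [if_pos hP.symm, hp]
      norm_num
  · intro j _
    simp [List.getD, List.getElem?_replicate]
    split_ifs <;> rfl

-- ===== VERDICT (by name: the statement is the Claim_ definition above) =====
theorem MostEOR_spec : Claim_equal_MostEOR := by
  intro arr _ hpre
  simp only [Spec_MostEOR, MostEOR, MostEOR_alt]
  have h := loop_inv arr.length arr [] (0, List.replicate arr.length 0, (PySem.Dict.empty).insert 0 (-1)) (0, 0, PySem.Set.ofList [0]) (by simp) (init_inv arr)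
  simp only [List.nil_append, List.length_nil, Nat.cast_zero] at h
  obtain ⟨b, hb, _, _, hlen, _, _, _, hdp, _, _, _, _⟩ := h
  obtain ⟨m, hm⟩ : ∃ m, arr.length = m + 1 := by
    cases arr with
    | nil => exact absurd rfl hpre
    | cons y t => exact ⟨t.length, by simp⟩
  rw [pyGet_neg_one _ m (hlen.trans hm)]
  simp only [Option.getD_some]
  exact (hdp m (by omega)).mpr (by omega)
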